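-- pv_equiv track=rewrite | github.com/RayLee1101/Codespace | HomeWork/HW_25.py | search
-- ===== SOURCE A (Python) =====
-- def search(string, d):
--     stack = []
--     dicts = []
--     left = ["{", "[", "("]
--     right = ["}", "]", ")"]
--     for i in string:
--         if i in left:
--             stack.append(i)
--         elif i in right:
--             if len(stack) > 0 and right[left.index(stack[-1])] == i:
--                 stack.pop()
--             else:
--                 return "fail"
--         else:
--             dicts.append([i, len(stack)])
--     if len(stack) != 0:
--         return "fail"
--     data = list(map(lambda x:x[0] ,filter(lambda x: x[1] == d, dicts)))
--     if len(data) == 0: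
--         return "pass,EMPTY"
--     else:
--         return "pass," + "".join(data)
-- ===== SOURCE B (Python) =====
-- def _strip_pairs(bs):
--     # one left-to-right pass deleting adjacent matched pairs "{}", "[]", "()"
--     out = []
--     i = 0
--     while i < len(bs):
--         if i + 1 < len(bs) and bs[i] + bs[i + 1] in ("{}", "[]", "()"):
--             i += 2
--         else:
--             out.append(bs[i])
--             i += 1
--     return out
--
--
-- def search(string, d):
--     # validity: the bracket subsequence reduces to nothing under repeated
--     # deletion of adjacent matched pairs (no stack needed)
--     bs = [c for c in string if c in "{}[]()"]
--     while True:
--         t = _strip_pairs(bs)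
--         if len(t) == len(bs):
--             break
--         bs = t
--     if bs:
--         return "fail"
--     # in a balanced string, nesting depth is just a running bracket counter
--     depth = 0
--     out = []
--     for c in string:
--         if c in "{[(":
--             depth += 1
--         elif c in "}])":
--             depth -= 1
--         elif depth == d:
--             out.append(c)
--     return "pass," + "".join(out) if out else "pass,EMPTY"
-- ===== Notes on version B (the rewrite author's own statement) =====
-- stated objective: alternative
-- what changed: B drops A's bracket stack and its record-then-filter/map pass entirely: validity is decided by reducing the bracket subsequence to a fixpoint under repeated deletion of adjacent matched pairs, and the depth-d characters are then collected with a plain integer nesting counter.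
import Mathlib
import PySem

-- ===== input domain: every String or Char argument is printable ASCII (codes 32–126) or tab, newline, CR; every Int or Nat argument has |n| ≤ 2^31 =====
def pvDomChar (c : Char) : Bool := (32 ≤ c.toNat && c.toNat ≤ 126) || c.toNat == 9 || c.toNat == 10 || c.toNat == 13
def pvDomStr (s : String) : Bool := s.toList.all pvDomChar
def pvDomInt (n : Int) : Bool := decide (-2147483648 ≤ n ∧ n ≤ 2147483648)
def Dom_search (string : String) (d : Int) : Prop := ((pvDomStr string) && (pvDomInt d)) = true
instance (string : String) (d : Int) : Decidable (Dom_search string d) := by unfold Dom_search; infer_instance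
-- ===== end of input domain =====

-- B replaces A's stack-based scan (record every char with its depth, then filter/map) by a different
-- algorithm: validity = the bracket subsequence reduces to [] under repeated deletion of adjacent
-- matched pairs; the depth-d characters are then collected with a plain integer counter.
-- Objective: alternative (a genuinely different algorithm; a timing run measured it faster).

-- ===== PORT A =====
def pvLeft : List Char := ['{', '[', '(']
def pvRight : List Char := ['}', ']', ')']

-- the for-loop of A: returns none on "return \"fail\"", otherwise the final (stack, dicts)
def searchLoop : List Char → List Char → List (Char × Int) → Option (List Char × List (Char × Int))
  | [], stack, dicts => some (stack, dicts)
  | i :: rest, stack, dicts =>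
    if i ∈ pvLeft then
      searchLoop rest (stack ++ [i]) dicts
    else if i ∈ pvRight then
      match stack.getLast? with
      | some top =>
        if ((PySem.List.index? pvLeft top).bind (fun k => PySem.List.pyGet? pvRight (k : Int))) = some i then
          searchLoop rest stack.dropLast dicts
        else none
      | none => none
    else
      searchLoop rest stack (dicts ++ [(i, (stack.length : Int))])

def search (string : String) (d : Int) : String :=
  match searchLoop string.toList [] [] with
  | none => "fail"
  | some (stack, dicts) =>
    if stack.length ≠ 0 then "fail"
    else
      let data := ((dicts.filter (fun x => x.2 == d)).map (fun x => x.1))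
      if data.length = 0 then "pass,EMPTY" else "pass," ++ String.ofList data

-- ===== PORT B =====
def pvBrackets : List Char := ['{', '}', '[', ']', '(', ')']
def pvOpenB : List Char := ['{', '[', '(']
def pvCloseB : List Char := ['}', ']', ')']

-- bs[i] + bs[i+1] in ("{}", "[]", "()")
def pvPairMatch (x y : Char) : Bool :=
  (x == '{' && y == '}') || (x == '[' && y == ']') || (x == '(' && y == ')')

-- _strip_pairs: one left-to-right pass deleting adjacent matched pairs
def stripPairs : List Char → List Char
  | x :: y :: rest => if pvPairMatch x y then stripPairs rest else x :: stripPairs (y :: rest)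
  | l => l

-- length bound, needed for the termination of the while-loop below
lemma stripPairs_length_le (l : List Char) : (stripPairs l).length ≤ l.length := by
  induction l using stripPairs.induct with
  | case1 x y rest h ih =>
    rw [stripPairs, if_pos h]
    simp only [List.length_cons]; omega
  | case2 x y rest h ih =>
    rw [stripPairs, if_neg h]
    simp only [List.length_cons] at *; omega
  | case3 l h =>
    match l, h with
    | [], _ => exact le_refl _
    | [x], _ => exact le_refl _
    | x :: y :: rest, h => exact absurd rfl (fun hh => h x y rest hh)

-- the while True loop: iterate _strip_pairs until the length no longer changes
def reduceFix (bs : List Char) : List Char :=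
  if (stripPairs bs).length = bs.length then bs else reduceFix (stripPairs bs)
termination_by bs.length
decreasing_by
  have := stripPairs_length_le bs
  omega

-- the counting for-loop of B (out is the accumulator)
def cntLoop (d : Int) : List Char → Int → List Char → List Char
  | [], _, out => out
  | c :: cs, depth, out =>
    if c ∈ pvOpenB then cntLoop d cs (depth + 1) out
    else if c ∈ pvCloseB then cntLoop d cs (depth - 1) out
    else if depth = d then cntLoop d cs depth (out ++ [c]) else cntLoop d cs depth out

def search_alt (string : String) (d : Int) : String :=
  let bs := string.toList.filter (fun c => c ∈ pvBrackets)
  let r := reduceFix bs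
  if r ≠ [] then "fail"
  else
    let out := cntLoop d string.toList 0 []
    if out ≠ [] then "pass," ++ String.ofList out else "pass,EMPTY"

-- ===== PRECONDITION & SPEC =====
def Spec_search (string : String) (d : Int) (out : String) : Prop := out = search_alt string d
instance (string : String) (d : Int) (out : String) : Decidable (Spec_search string d out) := by unfold Spec_search; infer_instance

-- ===== CLAIM (what is proved, stated in full; the proofs are below) =====
def Claim_equal_search : Prop := ∀ (string : String) (d : Int), Dom_search string d → Spec_search string d (search string d)

-- ===== LEMMAS AND PROOFS =====

-- stripPairs on a list with fewer than two elements is the identity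
lemma stripPairs_short (l : List Char) (h : ∀ (x y : Char) (rest : List Char), l = x :: y :: rest → False) :
    stripPairs l = l := by
  match l, h with
  | [], _ => rfl
  | [x], _ => rfl
  | x :: y :: rest, h => exact absurd rfl (fun hh => h x y rest hh)

-- reference single-pass stack normaliser: push each char, pop when it matches the top
def normLoop : List Char → List Char → List Char
  | [], st => st
  | c :: cs, st =>
    match st with
    | t :: st' => if pvPairMatch t c then normLoop cs st' else normLoop cs (c :: st)
    | [] => normLoop cs [c]

-- one step of the normaliser's stack
def stepSt (c : Char) (st : List Char) : List Char :=
  match st with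
  | t :: st' => if pvPairMatch t c then st' else c :: st
  | [] => [c]

lemma normLoop_cons (c : Char) (cs st : List Char) :
    normLoop (c :: cs) st = normLoop cs (stepSt c st) := by
  cases st <;> simp [normLoop, stepSt] <;> split_ifs <;> rfl

lemma pairMatch_left (x y : Char) (h : pvPairMatch x y = true) : x ∈ pvLeft := by
  simp only [pvPairMatch, Bool.or_eq_true, Bool.and_eq_true, beq_iff_eq] at h
  obtain (⟨h1, -⟩ | ⟨h1, -⟩) | ⟨h1, -⟩ := h <;> subst h1 <;> decide

lemma opener_no_match (x t : Char) (hx : x ∈ pvLeft) : pvPairMatch t x = false := by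
  have h3 : x = '{' ∨ x = '[' ∨ x = '(' := by simpa [pvLeft] using hx
  rcases h3 with rfl | rfl | rfl <;> simp [pvPairMatch]

lemma normLoop_cons_opener (c : Char) (cs st : List Char) (hc : c ∈ pvLeft) :
    normLoop (c :: cs) st = normLoop cs (c :: st) := by
  rw [normLoop_cons]
  cases st with
  | nil => rfl
  | cons t st' => simp [stepSt, opener_no_match c t hc]

lemma norm_strip (l : List Char) : ∀ st, normLoop (stripPairs l) st = normLoop l st := by
  induction l using stripPairs.induct with
  | case1 x y rest h ih =>
    intro st
    have hx : x ∈ pvLeft := pairMatch_left x y h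
    rw [stripPairs, if_pos h, ih st, normLoop_cons_opener x _ st hx,
      normLoop_cons y, stepSt, if_pos h]
  | case2 x y rest h ih =>
    intro st
    rw [stripPairs, if_neg h, normLoop_cons, normLoop_cons, ih]
  | case3 l h => intro st; rw [stripPairs_short l h]

lemma norm_reduceFix (bs : List Char) : ∀ st, normLoop (reduceFix bs) st = normLoop bs st := by
  induction bs using reduceFix.induct with
  | case1 bs h =>
    intro st
    rw [reduceFix, if_pos h]
  | case2 bs h ih =>
    intro st
    rw [reduceFix, if_neg h, ih st, norm_strip]

lemma stripPairs_eq_of_length (l : List Char) (h : (stripPairs l).length = l.length) :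
    stripPairs l = l := by
  induction l using stripPairs.induct with
  | case1 x y rest hm ih =>
    exfalso
    rw [stripPairs, if_pos hm] at h
    have := stripPairs_length_le rest
    simp only [List.length_cons] at h; omega
  | case2 x y rest hne ih =>
    rw [stripPairs, if_neg hne] at h ⊢
    simp only [List.length_cons, Nat.add_right_cancel_iff] at h
    rw [ih h]
  | case3 l hs => exact stripPairs_short l hs

lemma reduceFix_fixed (bs : List Char) : stripPairs (reduceFix bs) = reduceFix bs := by
  induction bs using reduceFix.induct with
  | case1 bs h => rw [reduceFix, if_pos h]; exact stripPairs_eq_of_length bs h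
  | case2 bs h ih => rw [reduceFix, if_neg h]; exact ih

lemma noPair_of_fixed (l : List Char) (h : stripPairs l = l) :
    List.IsChain (fun a b => pvPairMatch a b = false) l := by
  induction l using stripPairs.induct with
  | case1 x y rest hm ih =>
    exfalso
    rw [stripPairs, if_pos hm] at h
    have h1 := stripPairs_length_le rest
    have h2 := congrArg List.length h
    simp only [List.length_cons] at h2; omega
  | case2 x y rest hne ih =>
    rw [stripPairs, if_neg hne] at h
    have htail : stripPairs (y :: rest) = y :: rest := by
      exact List.cons.inj h |>.2
    exact List.isChain_cons_cons.mpr ⟨by simpa using hne, ih htail⟩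
  | case3 l hshape =>
    match l, hshape with
    | [], _ => exact List.IsChain.nil
    | [x], _ => exact List.isChain_singleton x
    | x :: y :: rest, hshape => exact absurd rfl (fun hh => hshape x y rest hh)

lemma norm_of_noPair (l : List Char) (hl : List.IsChain (fun a b => pvPairMatch a b = false) l) :
    ∀ st, (∀ t c, st.head? = some t → l.head? = some c → pvPairMatch t c = false) →
      normLoop l st = l.reverse ++ st := by
  induction l with
  | nil => intro st _; simp [normLoop]
  | cons c cs ih =>
    intro st hst
    have hpush : stepSt c st = c :: st := by
      cases st with
      | nil => rfl
      | cons t st' => simp [stepSt, hst t c rfl rfl]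
    rw [normLoop_cons, hpush, ih (List.IsChain.tail hl) (c :: st) ?_]
    · simp
    · intro t c' ht hc'
      simp only [List.head?_cons, Option.some.injEq] at ht; subst ht
      cases cs with
      | nil => simp at hc'
      | cons y ys =>
        simp only [List.head?_cons, Option.some.injEq] at hc'; subst hc'
        exact (List.isChain_cons_cons.mp hl).1

lemma closer_persists (cs : List Char) : ∀ st, (∃ x ∈ st, x ∈ pvRight) →
    ∃ x ∈ normLoop cs st, x ∈ pvRight := by
  induction cs with
  | nil => intro st h; simpa [normLoop] using h
  | cons c rest ih =>
    intro st h
    rw [normLoop_cons]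
    apply ih
    obtain ⟨x, hx, hxr⟩ := h
    cases st with
    | nil => simp at hx
    | cons t st' =>
      simp only [stepSt]
      split_ifs with hm
      · -- t was popped; t matches so t ∈ pvLeft, hence x ≠ t
        rcases List.mem_cons.mp hx with rfl | hx'
        · exfalso
          have := pairMatch_left x c hm
          fin_cases this <;> simp [pvRight] at hxr
        · exact ⟨x, hx', hxr⟩
      · exact ⟨x, List.mem_cons_of_mem c hx, hxr⟩

lemma mem_brackets_iff (c : Char) : c ∈ pvBrackets ↔ c ∈ pvLeft ∨ c ∈ pvRight := by
  simp [pvBrackets, pvLeft, pvRight]; tauto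

-- A's stack run matches the reference normaliser on the bracket subsequence
lemma searchLoop_norm : ∀ (cs stack : List Char) (ds : List (Char × Int)),
    (∀ c ∈ stack, c ∈ pvLeft) →
    (match searchLoop cs stack ds with
     | some (st', _) => normLoop (cs.filter (fun c => c ∈ pvBrackets)) stack.reverse = st'.reverse
     | none => ∃ x ∈ normLoop (cs.filter (fun c => c ∈ pvBrackets)) stack.reverse, x ∈ pvRight) := by
  intro cs
  induction cs with
  | nil => intro stack ds _; simp [searchLoop, normLoop]
  | cons i rest ih =>
    intro stack ds hst
    by_cases hL : i ∈ pvLeft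
    · have hbr : i ∈ pvBrackets := (mem_brackets_iff i).mpr (Or.inl hL)
      rw [searchLoop, if_pos hL]
      rw [List.filter_cons_of_pos (by simpa using hbr), normLoop_cons_opener i _ _ hL]
      have hst' : ∀ c ∈ stack ++ [i], c ∈ pvLeft := by
        intro c hc; rcases List.mem_append.mp hc with h | h
        · exact hst c h
        · simp at h; subst h; exact hL
      have := ih (stack ++ [i]) ds hst'
      simpa [List.reverse_append] using this
    · by_cases hR : i ∈ pvRight
      · have hbr : i ∈ pvBrackets := (mem_brackets_iff i).mpr (Or.inr hR)
        cases hlast : stack.getLast? with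
        | none =>
          have hnil : stack = [] := List.getLast?_eq_none_iff.mp hlast
          subst hnil
          have hcall : searchLoop (i :: rest) [] ds = none := by
            rw [searchLoop, if_neg hL, if_pos hR]
            rfl
          rw [hcall]
          rw [List.filter_cons_of_pos (by simpa using hbr), List.reverse_nil, normLoop_cons]
          refine closer_persists _ _ ⟨i, ?_, hR⟩
          show i ∈ stepSt i []
          simp [stepSt]
        | some t =>
          have htL : t ∈ pvLeft := hst t (List.mem_of_getLast? hlast)
          have hcall : searchLoop (i :: rest) stack ds =
              (if ((PySem.List.index? pvLeft t).bind
                  (fun k => PySem.List.pyGet? pvRight (k : Int))) = some i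
               then searchLoop rest stack.dropLast ds else none) := by
            rw [searchLoop, if_neg hL, if_pos hR, hlast]
          have hrev : stack.reverse = t :: stack.dropLast.reverse := by
            conv_lhs => rw [← List.dropLast_append_getLast? t hlast]
            simp
          have hiff : (((PySem.List.index? pvLeft t).bind
              (fun k => PySem.List.pyGet? pvRight (k : Int))) = some i) ↔ pvPairMatch t i = true := by
            rcases (show t = '{' ∨ t = '[' ∨ t = '(' by simpa [pvLeft] using htL) with rfl | rfl | rfl
            · rw [show ((PySem.List.index? pvLeft '{').bind
                  (fun k => PySem.List.pyGet? pvRight (k : Int))) = some '}' from by decide,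
                show (pvPairMatch '{' i = true) = (i = '}') from by simp [pvPairMatch]]
              exact ⟨fun h => (Option.some.injEq _ _ ▸ h).symm, fun h => by rw [h]⟩
            · rw [show ((PySem.List.index? pvLeft '[').bind
                  (fun k => PySem.List.pyGet? pvRight (k : Int))) = some ']' from by decide,
                show (pvPairMatch '[' i = true) = (i = ']') from by simp [pvPairMatch]]
              exact ⟨fun h => (Option.some.injEq _ _ ▸ h).symm, fun h => by rw [h]⟩
            · rw [show ((PySem.List.index? pvLeft '(').bind
                  (fun k => PySem.List.pyGet? pvRight (k : Int))) = some ')' from by decide,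
                show (pvPairMatch '(' i = true) = (i = ')') from by simp [pvPairMatch]]
              exact ⟨fun h => (Option.some.injEq _ _ ▸ h).symm, fun h => by rw [h]⟩
          rw [hcall, List.filter_cons_of_pos (by simpa using hbr)]
          by_cases hm : pvPairMatch t i = true
          · rw [if_pos (hiff.mpr hm)]
            have hst' : ∀ c ∈ stack.dropLast, c ∈ pvLeft := fun c hc =>
              hst c (List.mem_of_mem_dropLast hc)
            have hihd := ih stack.dropLast ds hst'
            have hstep : normLoop (i :: List.filter (fun c => decide (c ∈ pvBrackets)) rest)
                stack.reverse = normLoop (List.filter (fun c => decide (c ∈ pvBrackets)) rest)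
                stack.dropLast.reverse := by
              rw [hrev, normLoop_cons]
              congr 1
              simp [stepSt, hm]
            rw [hstep]
            exact hihd
          · rw [if_neg (fun hc => hm (hiff.mp hc))]
            have hstep : normLoop (i :: List.filter (fun c => decide (c ∈ pvBrackets)) rest)
                stack.reverse = normLoop (List.filter (fun c => decide (c ∈ pvBrackets)) rest)
                (i :: stack.reverse) := by
              rw [hrev, normLoop_cons]
              have hss : stepSt i (t :: stack.dropLast.reverse) = i :: t :: stack.dropLast.reverse := by
                simp [stepSt, hm]
              rw [hss, ← hrev]
            rw [hstep]
            exact closer_persists _ _ ⟨i, List.mem_cons_self, hR⟩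
      · have hbr : i ∉ pvBrackets := fun h => by
          rcases (mem_brackets_iff i).mp h with h | h; exact hL h; exact hR h
        rw [searchLoop, if_neg hL, if_neg hR]
        rw [List.filter_cons_of_neg (by simpa using hbr)]
        exact ih stack (ds ++ [(i, (stack.length : Int))]) hst

def pvData (d : Int) (dicts : List (Char × Int)) : List Char :=
  (dicts.filter (fun x => x.2 == d)).map (fun x => x.1)

lemma data_append (d : Int) (ds : List (Char × Int)) (p : Char × Int) :
    pvData d (ds ++ [p]) = pvData d ds ++ (if p.2 == d then [p.1] else []) := by
  simp [pvData, List.filter_append]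
  split_ifs with h <;> simp [h]

-- on a successful run, B's counter pass collects exactly the depth-d entries of A's dicts
lemma searchLoop_cnt (d : Int) : ∀ (cs stack : List Char) (ds : List (Char × Int))
    (st' : List Char) (ds' : List (Char × Int)),
    searchLoop cs stack ds = some (st', ds') →
    cntLoop d cs (stack.length : Int) (pvData d ds) = pvData d ds' := by
  intro cs
  induction cs with
  | nil =>
    intro stack ds st' ds' h
    simp only [searchLoop, Option.some.injEq, Prod.mk.injEq] at h
    rw [cntLoop, h.2]
  | cons i rest ih =>
    intro stack ds st' ds' h
    by_cases hL : i ∈ pvLeft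
    · rw [searchLoop, if_pos hL] at h
      rw [cntLoop, if_pos (show i ∈ pvOpenB from hL)]
      have := ih (stack ++ [i]) ds st' ds' h
      rw [← this]
      congr 1
      simp [List.length_append]
    · by_cases hR : i ∈ pvRight
      · cases hlast : stack.getLast? with
        | none =>
          rw [searchLoop, if_neg hL, if_pos hR, hlast] at h
          exact absurd h (by simp)
        | some t =>
          have hcall : searchLoop (i :: rest) stack ds =
              (if ((PySem.List.index? pvLeft t).bind
                  (fun k => PySem.List.pyGet? pvRight (k : Int))) = some i
               then searchLoop rest stack.dropLast ds else none) := by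
            rw [searchLoop, if_neg hL, if_pos hR, hlast]
          rw [hcall] at h
          by_cases hcond : ((PySem.List.index? pvLeft t).bind
              (fun k => PySem.List.pyGet? pvRight (k : Int))) = some i
          · rw [if_pos hcond] at h
            rw [cntLoop, if_neg (show i ∉ pvOpenB by
                intro hc; exact absurd (show i ∈ pvLeft from hc) hL),
              if_pos (show i ∈ pvCloseB from hR)]
            have := ih stack.dropLast ds st' ds' h
            rw [← this]
            congr 1
            have hne : stack ≠ [] := by
              intro hnil; rw [hnil] at hlast; simp at hlast
            have h1 : stack.dropLast.length = stack.length - 1 := by simp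
            have h2 : 1 ≤ stack.length := List.length_pos_iff.mpr hne
            rw [h1]; push_cast [h2]; ring
          · rw [if_neg hcond] at h; exact absurd h (by simp)
      · rw [searchLoop, if_neg hL, if_neg hR] at h
        rw [cntLoop, if_neg (show i ∉ pvOpenB from hL), if_neg (show i ∉ pvCloseB from hR)]
        have := ih stack (ds ++ [(i, (stack.length : Int))]) st' ds' h
        rw [← this, data_append]
        by_cases hd : (stack.length : Int) = d
        · rw [if_pos hd]; simp [hd]
        · rw [if_neg hd]; simp [hd]

-- ===== VERDICT (by name: the statement is the Claim_ definition above) =====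
theorem search_spec : Claim_equal_search := by
  intro s d _
  unfold Spec_search search search_alt
  have hnorm := searchLoop_norm s.toList [] [] (by simp)
  cases hA : searchLoop s.toList [] [] with
  | none =>
    rw [hA] at hnorm
    obtain ⟨x, hx, _⟩ := hnorm
    have hr : reduceFix (s.toList.filter (fun c => c ∈ pvBrackets)) ≠ [] := by
      intro hfix
      have := norm_reduceFix (s.toList.filter (fun c => c ∈ pvBrackets)) []
      rw [hfix] at this
      simp only [normLoop, List.reverse_nil] at this hx
      rw [← this] at hx
      simp at hx
    simp only [hr, if_pos (by simpa using hr)]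
  | some r =>
    obtain ⟨st', ds'⟩ := r
    rw [hA] at hnorm
    simp only [List.reverse_nil] at hnorm
    dsimp only
    by_cases hst : st' = []
    · subst hst
      -- A passes the stack test; show B's reduction reaches []
      have hfix : reduceFix (s.toList.filter (fun c => c ∈ pvBrackets)) = [] := by
        set bs := s.toList.filter (fun c => c ∈ pvBrackets) with hbs
        have h1 : normLoop (reduceFix bs) [] = [] := by
          rw [norm_reduceFix]; simpa using hnorm
        have h2 : normLoop (reduceFix bs) [] = (reduceFix bs).reverse ++ [] := by
          apply norm_of_noPair _ (noPair_of_fixed _ (reduceFix_fixed bs))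
          intro t c ht _; simp at ht
        rw [h2] at h1
        simpa using h1
      rw [if_neg (show ¬(reduceFix (List.filter (fun c => decide (c ∈ pvBrackets)) s.toList) ≠ [])
            by simpa using hfix)]
      have hcnt : cntLoop d s.toList 0 [] = pvData d ds' := by
        have := searchLoop_cnt d s.toList [] [] [] ds' hA
        simpa [pvData] using this
      rw [hcnt]
      rw [if_neg (show ¬(([] : List Char).length ≠ 0) from by simp)]
      have hdd : (List.map (fun x => x.1) (List.filter (fun x => x.2 == d) ds')) = pvData d ds' := rfl
      rw [hdd]
      by_cases hdat : pvData d ds' = []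
      · rw [if_pos (by rw [hdat]; rfl), if_neg (show ¬(pvData d ds' ≠ []) from fun hc => hc hdat)]
      · rw [if_neg (fun hc => hdat (List.length_eq_zero_iff.mp hc)), if_pos hdat]
    · -- A fails the stack test; B's reduction cannot be empty either
      have hr : reduceFix (s.toList.filter (fun c => c ∈ pvBrackets)) ≠ [] := by
        intro hfix
        have := norm_reduceFix (s.toList.filter (fun c => c ∈ pvBrackets)) []
        rw [hfix] at this
        simp only [normLoop] at this
        rw [← this] at hnorm
        exact hst (by simpa using hnorm.symm)
      rw [if_pos (show st'.length ≠ 0 by simpa [List.length_eq_zero_iff] using hst)]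
      rw [if_pos (by simpa using hr)]
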